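-- pv_equiv track=rewrite | github.com/ericdipietro-collab/JobSearch | src/jobsearch/scraper/engine.py | _classify_empty_result
-- ===== SOURCE A (Python) =====
-- from typing import Any, Dict, List, Type, Optional
--
-- def _classify_empty_result(scrape_status: str, scrape_note: str, company: Dict[str, Any]) -> str | None:
--     """Classify why a scrape returned 0 jobs into a machine-readable reason code.
--
--     Returns one of:
--       blocked_bot_protection, auth_required, broken_site, wrong_url,
--       no_openings, hidden_api_not_parsed, selector_miss, geo_or_cookie_gate,
--       unsupported_ats, or unknown.
--     """
--     note_lower = str(scrape_note or "").lower()
--     careers_url = str(company.get("careers_url") or "").lower()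
--
--     if scrape_status == "blocked":
--         if any(tok in note_lower for tok in ("unsupported ats", "unsupported vendor", "eightfold", "icims", "taleo", "successfactors")):
--             return "unsupported_ats"
--         if any(tok in note_lower for tok in ("401", "403", "login", "auth", "sign in")):
--             return "auth_required"
--         if any(tok in note_lower for tok in ("cookie", "consent", "gdpr", "region", "geo", "country not supported")):
--             return "geo_or_cookie_gate"
--         return "blocked_bot_protection"
--
--     if scrape_status in {"empty", "budget_exhausted", "low_signal", ""}:
--         if any(tok in note_lower for tok in ("500", "502", "503", "504", "connection", "timeout", "refused")):
--             return "broken_site"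
--         if any(tok in note_lower for tok in ("redirect", "wrong domain", "not a careers", "homepage")):
--             return "wrong_url"
--         if any(tok in note_lower for tok in ("no open", "no current", "no position", "no job", "0 opening")):
--             return "no_openings"
--         if any(tok in note_lower for tok in ("xhr", "hidden api", "json endpoint not parsed")):
--             return "hidden_api_not_parsed"
--         if any(tok in note_lower for tok in ("selector", "no matching element", "low_signal")):
--             return "selector_miss"
--         if any(tok in note_lower for tok in ("cookie", "consent", "gdpr", "region", "geo", "country not supported")):
--             return "geo_or_cookie_gate"
--         if any(tok in note_lower for tok in ("icims", "taleo", "successfactors", "oracle hcm", "sap", "unsupported")):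
--             return "unsupported_ats"
--         # If careers_url points to a known unsupported ATS vendor homepage
--         for vendor in ("icims.com", "taleo.net", "successfactors.com", "oraclecloud.com"):
--             if vendor in careers_url:
--                 return "unsupported_ats"
--
--     return "unknown"
-- ===== SOURCE B (Python) =====
-- # B: no ordered short-circuit if-chain; instead score every category at once
-- # and pick the best (lowest-priority) match. Each rule carries a numeric
-- # priority encoding A's precedence; the careers_url vendor check is just one
-- # more scored candidate with the lowest precedence in the empty-like group.
--
-- _BLOCKED_TABLE = [
--     (0, ("unsupported ats", "unsupported vendor", "eightfold", "icims", "taleo", "successfactors"), "unsupported_ats"),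
--     (1, ("401", "403", "login", "auth", "sign in"), "auth_required"),
--     (2, ("cookie", "consent", "gdpr", "region", "geo", "country not supported"), "geo_or_cookie_gate"),
-- ]
--
-- _EMPTY_TABLE = [
--     (0, ("500", "502", "503", "504", "connection", "timeout", "refused"), "broken_site"),
--     (1, ("redirect", "wrong domain", "not a careers", "homepage"), "wrong_url"),
--     (2, ("no open", "no current", "no position", "no job", "0 opening"), "no_openings"),
--     (3, ("xhr", "hidden api", "json endpoint not parsed"), "hidden_api_not_parsed"),
--     (4, ("selector", "no matching element", "low_signal"), "selector_miss"),
--     (5, ("cookie", "consent", "gdpr", "region", "geo", "country not supported"), "geo_or_cookie_gate"),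
--     (6, ("icims", "taleo", "successfactors", "oracle hcm", "sap", "unsupported"), "unsupported_ats"),
-- ]
--
-- _VENDOR_TOKENS = ("icims.com", "taleo.net", "successfactors.com", "oraclecloud.com")
--
--
-- def _classify_empty_result(scrape_status, scrape_note, company):
--     note = str(scrape_note or "").lower()
--     if scrape_status == "blocked":
--         hits = [(p, code) for p, toks, code in _BLOCKED_TABLE
--                 if any(t in note for t in toks)]
--         return min(hits, key=lambda h: h[0])[1] if hits else "blocked_bot_protection"
--     if scrape_status in ("empty", "budget_exhausted", "low_signal", ""):
--         hits = [(p, code) for p, toks, code in _EMPTY_TABLE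
--                 if any(t in note for t in toks)]
--         url = str(company.get("careers_url") or "").lower()
--         if any(v in url for v in _VENDOR_TOKENS):
--             hits.append((7, "unsupported_ats"))
--         return min(hits, key=lambda h: h[0])[1] if hits else "unknown"
--     return "unknown"
-- ===== Notes on version B (the rewrite author's own statement) =====
-- stated objective: alternative
-- what changed: Replaced A's ordered short-circuit if-chain with a scoring pass: every rule category (including the careers_url vendor check as a priority-7 candidate) is evaluated, all matches are collected as (priority, code) pairs, and the minimum-priority hit is returned.
import Mathlib
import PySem

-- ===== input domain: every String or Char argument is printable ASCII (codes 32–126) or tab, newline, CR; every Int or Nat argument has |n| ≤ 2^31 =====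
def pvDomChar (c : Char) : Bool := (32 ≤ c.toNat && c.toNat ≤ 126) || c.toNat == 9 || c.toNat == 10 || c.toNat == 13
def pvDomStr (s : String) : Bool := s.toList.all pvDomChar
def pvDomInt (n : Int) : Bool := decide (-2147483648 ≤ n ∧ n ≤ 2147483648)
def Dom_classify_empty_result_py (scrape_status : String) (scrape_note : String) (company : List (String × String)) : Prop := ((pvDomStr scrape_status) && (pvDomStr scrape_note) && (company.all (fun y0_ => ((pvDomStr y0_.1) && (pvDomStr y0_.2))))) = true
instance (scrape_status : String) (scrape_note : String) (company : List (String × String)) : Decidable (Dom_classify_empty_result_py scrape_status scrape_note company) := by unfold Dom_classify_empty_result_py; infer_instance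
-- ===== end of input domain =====

-- B replaces A's ordered short-circuit if-chain by scoring all rule categories at once and taking the minimum-priority match (objective: alternative; same cost).


-- ===== PORT A =====
def classify_empty_result_py (scrape_status : String) (scrape_note : String) (company : List (String × String)) : Option String :=
  let note_lower := PySem.Str.lower scrape_note
  let careers_url := PySem.Str.lower (((PySem.Dict.mk company).get? "careers_url").getD "")
  if scrape_status == "blocked" then
    if ["unsupported ats", "unsupported vendor", "eightfold", "icims", "taleo", "successfactors"].any (fun tok => PySem.Str.isIn tok note_lower) then some "unsupported_ats"
    else if ["401", "403", "login", "auth", "sign in"].any (fun tok => PySem.Str.isIn tok note_lower) then some "auth_required"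
    else if ["cookie", "consent", "gdpr", "region", "geo", "country not supported"].any (fun tok => PySem.Str.isIn tok note_lower) then some "geo_or_cookie_gate"
    else some "blocked_bot_protection"
  else if scrape_status == "empty" || scrape_status == "budget_exhausted" || scrape_status == "low_signal" || scrape_status == "" then
    if ["500", "502", "503", "504", "connection", "timeout", "refused"].any (fun tok => PySem.Str.isIn tok note_lower) then some "broken_site"
    else if ["redirect", "wrong domain", "not a careers", "homepage"].any (fun tok => PySem.Str.isIn tok note_lower) then some "wrong_url"
    else if ["no open", "no current", "no position", "no job", "0 opening"].any (fun tok => PySem.Str.isIn tok note_lower) then some "no_openings"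
    else if ["xhr", "hidden api", "json endpoint not parsed"].any (fun tok => PySem.Str.isIn tok note_lower) then some "hidden_api_not_parsed"
    else if ["selector", "no matching element", "low_signal"].any (fun tok => PySem.Str.isIn tok note_lower) then some "selector_miss"
    else if ["cookie", "consent", "gdpr", "region", "geo", "country not supported"].any (fun tok => PySem.Str.isIn tok note_lower) then some "geo_or_cookie_gate"
    else if ["icims", "taleo", "successfactors", "oracle hcm", "sap", "unsupported"].any (fun tok => PySem.Str.isIn tok note_lower) then some "unsupported_ats"
    else if ["icims.com", "taleo.net", "successfactors.com", "oraclecloud.com"].any (fun vendor => PySem.Str.isIn vendor careers_url) then some "unsupported_ats"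
    else some "unknown"
  else some "unknown"

-- ===== PORT B =====
-- B: scores every category at once (no short-circuit chain) and picks the
-- minimum-priority hit; the vendor-url check is just one more scored candidate.
def pvBlockedTable : List (Nat × List String × String) :=
  [ (0, ["unsupported ats", "unsupported vendor", "eightfold", "icims", "taleo", "successfactors"], "unsupported_ats")
  , (1, ["401", "403", "login", "auth", "sign in"], "auth_required")
  , (2, ["cookie", "consent", "gdpr", "region", "geo", "country not supported"], "geo_or_cookie_gate") ]

def pvEmptyTable : List (Nat × List String × String) :=
  [ (0, ["500", "502", "503", "504", "connection", "timeout", "refused"], "broken_site")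
  , (1, ["redirect", "wrong domain", "not a careers", "homepage"], "wrong_url")
  , (2, ["no open", "no current", "no position", "no job", "0 opening"], "no_openings")
  , (3, ["xhr", "hidden api", "json endpoint not parsed"], "hidden_api_not_parsed")
  , (4, ["selector", "no matching element", "low_signal"], "selector_miss")
  , (5, ["cookie", "consent", "gdpr", "region", "geo", "country not supported"], "geo_or_cookie_gate")
  , (6, ["icims", "taleo", "successfactors", "oracle hcm", "sap", "unsupported"], "unsupported_ats") ]

def pvVendorTokens : List String := ["icims.com", "taleo.net", "successfactors.com", "oraclecloud.com"]

-- min(hits, key=lambda h: h[0]) — first element with minimal priority, none on []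
def pvMinByPrio : List (Nat × String) → Option (Nat × String)
  | [] => none
  | h :: t => some (t.foldl (fun a b => if b.1 < a.1 then b else a) h)

def pvHits (table : List (Nat × List String × String)) (note : String) : List (Nat × String) :=
  table.filterMap (fun r => if r.2.1.any (fun t => PySem.Str.isIn t note) then some (r.1, r.2.2) else none)

def classify_empty_result_py_alt (scrape_status : String) (scrape_note : String) (company : List (String × String)) : Option String :=
  let note := PySem.Str.lower scrape_note
  if scrape_status == "blocked" then
    match pvMinByPrio (pvHits pvBlockedTable note) with
    | some h => some h.2
    | none => some "blocked_bot_protection"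
  else if ["empty", "budget_exhausted", "low_signal", ""].contains scrape_status then
    let url := PySem.Str.lower (((PySem.Dict.mk company).get? "careers_url").getD "")
    let hits := pvHits pvEmptyTable note
    let hits := if pvVendorTokens.any (fun v => PySem.Str.isIn v url) then hits ++ [(7, "unsupported_ats")] else hits
    match pvMinByPrio hits with
    | some h => some h.2
    | none => some "unknown"
  else some "unknown"

-- ===== PRECONDITION & SPEC =====
def Spec_classify_empty_result_py (scrape_status : String) (scrape_note : String) (company : List (String × String)) (out : Option String) : Prop := out = classify_empty_result_py_alt scrape_status scrape_note company
instance (scrape_status : String) (scrape_note : String) (company : List (String × String)) (out : Option String) : Decidable (Spec_classify_empty_result_py scrape_status scrape_note company out) := by unfold Spec_classify_empty_result_py; infer_instance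

-- ===== CLAIM (what is proved, stated in full; the proofs are below) =====
def Claim_equal_classify_empty_result_py : Prop := ∀ (scrape_status : String) (scrape_note : String) (company : List (String × String)), Dom_classify_empty_result_py scrape_status scrape_note company → Spec_classify_empty_result_py scrape_status scrape_note company (classify_empty_result_py scrape_status scrape_note company)

-- ===== LEMMAS AND PROOFS =====

-- the min-fold skips every element when the seed already has minimal priority
theorem pv_foldl_min_skip (l : List (Nat × String)) (a : Nat × String)
    (h : ∀ b ∈ l, a.1 ≤ b.1) :
    l.foldl (fun a b => if b.1 < a.1 then b else a) a = a := by
  induction l with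
  | nil => rfl
  | cons x t ih =>
    have hx : ¬ x.1 < a.1 := by have := h x (List.mem_cons_self); omega
    simp only [List.foldl_cons, if_neg hx]
    exact ih (fun b hb => h b (List.mem_cons_of_mem _ hb))

-- on a priority-sorted list, the minimum-priority hit is the head
theorem pvMinByPrio_sorted (l : List (Nat × String))
    (hp : l.Pairwise (fun x y => x.1 ≤ y.1)) : pvMinByPrio l = l.head? := by
  cases l with
  | nil => rfl
  | cons a t =>
    have := (List.pairwise_cons.mp hp).1
    simp only [pvMinByPrio, List.head?_cons, pv_foldl_min_skip t a this]

-- hits inherit the table's priority ordering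
theorem pvHits_pairwise (table : List (Nat × List String × String)) (note : String)
    (hp : table.Pairwise (fun x y => x.1 ≤ y.1)) :
    (pvHits table note).Pairwise (fun x y => x.1 ≤ y.1) := by
  unfold pvHits
  rw [List.pairwise_filterMap]
  refine hp.imp ?_
  intro a a' hle b hb b' hb'
  split at hb
  · split at hb'
    · cases hb; cases hb'; exact hle
    · exact absurd hb (by cases hb' )
  · cases hb

-- every hit's priority is bounded by the table's bound
theorem pvHits_le (table : List (Nat × List String × String)) (note : String) (n : Nat)
    (h : ∀ r ∈ table, r.1 ≤ n) : ∀ b ∈ pvHits table note, b.1 ≤ n := by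
  intro b hb
  unfold pvHits at hb
  rw [List.mem_filterMap] at hb
  obtain ⟨r, hr, hfb⟩ := hb
  split at hfb
  · cases hfb; exact h r hr
  · cases hfb

theorem pvMin_blocked (note : String) :
    pvMinByPrio (pvHits pvBlockedTable note) = (pvHits pvBlockedTable note).head? :=
  pvMinByPrio_sorted _ (pvHits_pairwise _ _ (by decide))

theorem pvMin_empty (note : String) :
    pvMinByPrio (pvHits pvEmptyTable note) = (pvHits pvEmptyTable note).head? :=
  pvMinByPrio_sorted _ (pvHits_pairwise _ _ (by decide))

theorem pvMin_empty_vendor (note : String) :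
    pvMinByPrio (pvHits pvEmptyTable note ++ [(7, "unsupported_ats")]) =
      (pvHits pvEmptyTable note ++ [(7, "unsupported_ats")]).head? := by
  refine pvMinByPrio_sorted _ (List.pairwise_append.mpr ⟨pvHits_pairwise _ _ (by decide), ?_, ?_⟩)
  · simp
  · intro a ha b hb
    have h6 : a.1 ≤ 6 := pvHits_le pvEmptyTable note 6 (by decide) a ha
    simp only [List.mem_singleton] at hb
    subst hb
    exact Nat.le_trans h6 (by norm_num)

-- head? distributes linearly over a filterMap of a cons (no term duplication)
theorem pv_head?_filterMap_cons {α β : Type} (f : α → Option β) (a : α) (l : List α) :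
    (List.filterMap f (a :: l)).head? = (f a).or (List.filterMap f l).head? := by
  cases h : f a <;> simp [h]

-- ===== VERDICT (by name: the statement is the Claim_ definition above) =====
set_option maxHeartbeats 4000000 in
theorem classify_empty_result_py_spec : Claim_equal_classify_empty_result_py := by
  intro scrape_status scrape_note company _
  unfold Spec_classify_empty_result_py
  simp only [classify_empty_result_py, classify_empty_result_py_alt]
  simp only [apply_ite pvMinByPrio]
  simp only [pvMin_empty_vendor, pvMin_empty, pvMin_blocked, List.head?_append]
  simp only [pvHits, pvBlockedTable, pvEmptyTable, pvVendorTokens,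
    pv_head?_filterMap_cons, List.filterMap_nil, List.head?_nil, List.head?_cons,
    List.any_cons, List.any_nil, List.contains_cons, List.contains_nil,
    Bool.or_false, Bool.or_assoc]
  split_ifs <;> rfl
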